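-- pv_equiv track=rewrite | github.com/zarinaIbr/MultiSmiles | MultiSmiles.py | _split_smile
-- ===== SOURCE A (Python) =====
-- def _split_smile(sm_t):
--     for i in sm_t[1:]:
--         if i == '+' or i == '^':
--             l = sm_t[1:][:sm_t[1:].index(i)].split('{')
--             if len(l) == 2:
--                 return l[0], sm_t[sm_t[1:].index(i) + 1:]
--             if len(l) == 3:
--                 return l[0], sm_t[sm_t[1:].index(i) + 1:]
-- ===== SOURCE B (Python) =====
-- def _split_smile(sm_t):
--     s = sm_t[1:]
--     for p in sorted(p for p in (s.find('+'), s.find('^')) if p != -1):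
--         pieces = s[:p].split('{')
--         if len(pieces) in (2, 3):
--             return pieces[0], s[p:]
-- ===== Notes on version B (the rewrite author's own statement) =====
-- stated objective: faster
-- what changed: B computes the first occurrence of each of the two separator characters once with str.find and tests only those (at most two) candidate positions in ascending order, instead of A's character-by-character scan that re-runs str.index and the prefix split at every separator occurrence.
import Mathlib
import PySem

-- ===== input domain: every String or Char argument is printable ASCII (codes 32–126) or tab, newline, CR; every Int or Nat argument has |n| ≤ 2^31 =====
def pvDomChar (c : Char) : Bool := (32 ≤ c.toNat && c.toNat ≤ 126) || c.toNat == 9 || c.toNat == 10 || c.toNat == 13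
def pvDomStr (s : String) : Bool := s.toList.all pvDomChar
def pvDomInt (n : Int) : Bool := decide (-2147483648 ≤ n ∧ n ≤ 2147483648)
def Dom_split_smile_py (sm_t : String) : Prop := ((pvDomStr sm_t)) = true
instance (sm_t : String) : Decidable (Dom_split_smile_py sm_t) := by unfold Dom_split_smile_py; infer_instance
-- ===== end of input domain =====

-- B replaces A's character-by-character scan (which re-finds the first '+'/'^' via .index at every
-- separator occurrence) by computing the two first-occurrence positions up front with .find and
-- testing only those two candidates in ascending order (measured faster on the generated inputs).

-- ===== PORT A =====
-- the for-loop of _split_smile; `sm` is sm_t, `s` is sm_t[1:], `rest` the characters still to scan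
def splitSmileLoopA (sm s : List Char) : List Char → Option (String × String)
  | [] => none
  | i :: rest =>
    if i = '+' ∨ i = '^' then
      match PySem.List.index? s i with
      | some idx =>
        let l := PySem.Chars.splitOn (PySem.List.slice s none (some (idx : Int))) ['{']
        if l.length = 2 then
          some (String.mk (l.headD []), String.mk (PySem.List.slice sm (some ((idx : Int) + 1)) none))
        else if l.length = 3 then
          some (String.mk (l.headD []), String.mk (PySem.List.slice sm (some ((idx : Int) + 1)) none))
        else splitSmileLoopA sm s rest
      | none => splitSmileLoopA sm s rest   -- unreachable: i is drawn from s, so s.index(i) succeeds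
    else splitSmileLoopA sm s rest

def split_smile_py (sm_t : String) : Option (String × String) :=
  let sm := sm_t.toList
  let s := PySem.List.slice sm (some 1) none
  splitSmileLoopA sm s s

-- ===== PORT B =====
-- the for-loop of B over the sorted candidate positions
def splitSmileLoopB (s : List Char) : List Int → Option (String × String)
  | [] => none
  | p :: ps =>
    let pieces := PySem.Chars.splitOn (PySem.List.slice s none (some p)) ['{']
    if pieces.length = 2 ∨ pieces.length = 3 then
      some (String.mk (pieces.headD []), String.mk (PySem.List.slice s (some p) none))
    else splitSmileLoopB s ps

def split_smile_py_alt (sm_t : String) : Option (String × String) :=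
  let s := PySem.List.slice sm_t.toList (some 1) none
  let cands := PySem.List.sorted
    (([PySem.Chars.find s ['+'], PySem.Chars.find s ['^']].filter (fun p => p != -1)))
    (fun p => p)
  splitSmileLoopB s cands

-- ===== PRECONDITION & SPEC =====
def Spec_split_smile_py (sm_t : String) (out : Option (String × String)) : Prop := out = split_smile_py_alt sm_t
instance (sm_t : String) (out : Option (String × String)) : Decidable (Spec_split_smile_py sm_t out) := by unfold Spec_split_smile_py; infer_instance

-- ===== CLAIM (what is proved, stated in full; the proofs are below) =====
def Claim_equal_split_smile_py : Prop := ∀ (sm_t : String), Dom_split_smile_py sm_t → Spec_split_smile_py sm_t (split_smile_py sm_t)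

-- ===== LEMMAS AND PROOFS =====

-- the value A's loop body produces when it inspects character i (none = the loop continues)
def resA (sm s : List Char) (i : Char) : Option (String × String) :=
  if i = '+' ∨ i = '^' then
    match PySem.List.index? s i with
    | some idx =>
      let l := PySem.Chars.splitOn (PySem.List.slice s none (some (idx : Int))) ['{']
      if l.length = 2 then
        some (String.mk (l.headD []), String.mk (PySem.List.slice sm (some ((idx : Int) + 1)) none))
      else if l.length = 3 then
        some (String.mk (l.headD []), String.mk (PySem.List.slice sm (some ((idx : Int) + 1)) none))
      else none
    | none => none
  else none

-- the value B's loop body produces at candidate position p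
def resB (s : List Char) (p : Int) : Option (String × String) :=
  let pieces := PySem.Chars.splitOn (PySem.List.slice s none (some p)) ['{']
  if pieces.length = 2 ∨ pieces.length = 3 then
    some (String.mk (pieces.headD []), String.mk (PySem.List.slice s (some p) none))
  else none

lemma loopA_eq_findSome? (sm s : List Char) (rest : List Char) :
    splitSmileLoopA sm s rest = rest.findSome? (resA sm s) := by
  induction rest with
  | nil => rfl
  | cons i rest ih =>
    rw [List.findSome?_cons]
    by_cases hi : i = '+' ∨ i = '^'
    · have hix : PySem.List.index? s i = List.idxOf? i s := rfl
      cases hidx : List.idxOf? i s with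
      | none => simp [splitSmileLoopA, resA, hi, hidx, ih]
      | some idx =>
        simp only [splitSmileLoopA, resA, if_pos hi, hix, hidx]
        split_ifs <;> simp [ih]
    · simp [splitSmileLoopA, resA, hi, ih]

lemma loopB_eq_findSome? (s : List Char) (ps : List Int) :
    splitSmileLoopB s ps = ps.findSome? (resB s) := by
  induction ps with
  | nil => rfl
  | cons p ps ih =>
    rw [List.findSome?_cons]
    simp only [splitSmileLoopB, resB]
    split_ifs <;> simp [ih]

lemma pvFindSome?_const {α β : Type} (l : List α) (g : α → Option β) (o : Option β)
    (h1 : ∀ x ∈ l, g x = none ∨ g x = o) (h2 : ∃ x ∈ l, g x = o) :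
    l.findSome? g = o := by
  cases o with
  | none => exact List.findSome?_eq_none_iff.2 (fun x hx => (h1 x hx).elim id id)
  | some v =>
    induction l with
    | nil => rcases h2 with ⟨x, hx, _⟩; simp at hx
    | cons a l ih =>
      rcases h1 a (List.mem_cons_self) with ha | ha
      · rw [List.findSome?_cons, ha]
        apply ih (fun x hx => h1 x (List.mem_cons_of_mem _ hx))
        rcases h2 with ⟨x, hx, hgx⟩
        rcases List.mem_cons.1 hx with rfl | hx
        · rw [ha] at hgx; cases hgx
        · exact ⟨x, hx, hgx⟩
      · rw [List.findSome?_cons, ha]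

lemma singleton_prefix_iff (c : Char) (l : List Char) : [c] <+: l ↔ l.head? = some c := by
  constructor
  · rintro ⟨t, rfl⟩; rfl
  · intro h
    cases l with
    | nil => simp at h
    | cons a t => simp at h; exact ⟨t, by simp [h]⟩

lemma singleton_infix_iff (c : Char) (s : List Char) : [c] <:+: s ↔ c ∈ s := by
  constructor
  · intro h; exact h.subset (by simp)
  · intro h
    rcases List.append_of_mem h with ⟨l1, l2, rfl⟩
    exact ⟨l1, l2, by simp⟩

-- the first occurrence of c in s, described by Chars.find
lemma findChar_spec (s : List Char) (c : Char) (h : c ∈ s) :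
    0 ≤ PySem.Chars.find s [c] ∧
    s[(PySem.Chars.find s [c]).toNat]? = some c ∧
    ∀ j < (PySem.Chars.find s [c]).toNat, s[j]? ≠ some c := by
  have hnn : 0 ≤ PySem.Chars.find s [c] :=
    (PySem.Chars.find_nonneg_iff s [c]).2 ((singleton_infix_iff c s).2 h)
  obtain ⟨hpre, hmin⟩ := PySem.Chars.find_spec hnn
  refine ⟨hnn, ?_, ?_⟩
  · have := (singleton_prefix_iff c _).1 hpre
    rwa [List.head?_drop] at this
  · intro j hj hget
    exact hmin j hj ((singleton_prefix_iff c _).2 (by rwa [List.head?_drop]))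

lemma index?_eq_findChar (s : List Char) (c : Char) (h : c ∈ s) :
    PySem.List.index? s c = some (PySem.Chars.find s [c]).toNat := by
  obtain ⟨hnn, hget, hmin⟩ := findChar_spec s c h
  have hlt : (PySem.Chars.find s [c]).toNat < s.length := by
    by_contra hge
    rw [List.getElem?_eq_none (by omega)] at hget
    simp at hget
  show List.idxOf? c s = _
  rw [List.idxOf?_eq_some_iff]
  refine ⟨hlt, ?_, ?_⟩
  · have := hget; rwa [List.getElem?_eq_getElem hlt, Option.some_inj] at this
  · intro j hj hjc
    exact hmin j hj (by rw [List.getElem?_eq_getElem (by omega), hjc])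

-- A's body at a separator character equals B's body at that character's first occurrence
lemma resA_eq_resB (sm s : List Char) (hs : s = sm.drop 1) (c : Char)
    (hsep : c = '+' ∨ c = '^') (hc : c ∈ s) :
    resA sm s c = resB s (PySem.Chars.find s [c]) := by
  obtain ⟨hnn, -, -⟩ := findChar_spec s c hc
  simp only [resA, if_pos hsep, index?_eq_findChar s c hc]
  have hcast : ((PySem.Chars.find s [c]).toNat : Int) = PySem.Chars.find s [c] := Int.toNat_of_nonneg hnn
  have htail : PySem.List.slice sm (some (((PySem.Chars.find s [c]).toNat : Int) + 1)) none
      = PySem.List.slice s (some (PySem.Chars.find s [c])) none := by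
    rw [← hcast, PySem.List.slice_from sm (by omega), PySem.List.slice_from s (by omega), hs,
      List.drop_drop]
    congr 1
    omega
  rw [resB, htail]
  simp only [hcast]
  split_ifs with h2 h3 h23 <;> simp_all

lemma resA_none (sm s : List Char) (c : Char) (hsep : ¬ (c = '+' ∨ c = '^')) :
    resA sm s c = none := by
  rw [resA, if_neg hsep]

-- characters strictly before the first occurrences of both separators are not separators
lemma resA_none_take (sm s : List Char) (n : Nat)
    (hn : ∀ c, (c = '+' ∨ c = '^') → c ∈ s → n ≤ (PySem.Chars.find s [c]).toNat) :
    ∀ x ∈ s.take n, resA sm s x = none := by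
  intro x hx
  by_cases hsep : x = '+' ∨ x = '^'
  · exfalso
    obtain ⟨j, hj, hxj⟩ := List.mem_iff_getElem.1 hx
    have hjn : j < n := by
      have := hj; simp [List.length_take] at this; omega
    have hxs : x ∈ s := List.mem_of_mem_take hx
    obtain ⟨-, -, hmin⟩ := findChar_spec s x hxs
    have hjlen : j < s.length := by
      have := hj; simp [List.length_take] at this; omega
    refine hmin j (by have := hn x hsep hxs; omega) ?_
    simp only [List.getElem_take] at hxj
    rw [List.getElem?_eq_getElem hjlen, hxj]
  · exact resA_none sm s x hsep

-- core: both separators present, the first occurrence of c1 strictly before that of c2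
lemma core_two (sm s : List Char) (hs : s = sm.drop 1) (c1 c2 : Char)
    (hcs : (c1 = '+' ∧ c2 = '^') ∨ (c1 = '^' ∧ c2 = '+'))
    (hc1 : c1 ∈ s) (hc2 : c2 ∈ s)
    (hlt : PySem.Chars.find s [c1] < PySem.Chars.find s [c2]) :
    s.findSome? (resA sm s) = [PySem.Chars.find s [c1], PySem.Chars.find s [c2]].findSome? (resB s) := by
  have hsep1 : c1 = '+' ∨ c1 = '^' := by rcases hcs with ⟨h, -⟩ | ⟨h, -⟩ <;> simp [h]
  have hsep2 : c2 = '+' ∨ c2 = '^' := by rcases hcs with ⟨-, h⟩ | ⟨-, h⟩ <;> simp [h]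
  obtain ⟨hnn1, hget1, -⟩ := findChar_spec s c1 hc1
  obtain ⟨hnn2, -, -⟩ := findChar_spec s c2 hc2
  cases hr1 : resB s (PySem.Chars.find s [c1]) with
  | none =>
    have hA : s.findSome? (resA sm s) = resB s (PySem.Chars.find s [c2]) := by
      apply pvFindSome?_const
      · intro x hx
        by_cases hsep : x = '+' ∨ x = '^'
        · have hx12 : x = c1 ∨ x = c2 := by
            rcases hcs with ⟨h1, h2⟩ | ⟨h1, h2⟩ <;> subst h1 <;> subst h2 <;> tauto
          rcases hx12 with rfl | rfl
          · exact Or.inl ((resA_eq_resB sm s hs x hsep hx).trans hr1)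
          · exact Or.inr (resA_eq_resB sm s hs x hsep hx)
        · exact Or.inl (resA_none sm s x hsep)
      · exact ⟨c2, hc2, resA_eq_resB sm s hs c2 hsep2 hc2⟩
    rw [hA]
    cases h2 : resB s (PySem.Chars.find s [c2]) <;> simp [hr1, h2]
  | some v =>
    set n := (PySem.Chars.find s [c1]).toNat with hn
    have hnlt : n < s.length := by
      by_contra hge
      rw [List.getElem?_eq_none (by omega)] at hget1
      simp at hget1
    have hgetn : s[n] = c1 := by
      rw [List.getElem?_eq_getElem hnlt] at hget1
      exact Option.some_inj.1 hget1
    have hsplit : s.findSome? (resA sm s) = (s.take n ++ s.drop n).findSome? (resA sm s) := by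
      rw [List.take_append_drop]
    rw [hsplit, List.findSome?_append]
    have htake : (s.take n).findSome? (resA sm s) = none := by
      apply List.findSome?_eq_none_iff.2
      apply resA_none_take
      intro c hcsep hcmem
      have hx12 : c = c1 ∨ c = c2 := by
        rcases hcs with ⟨h1, h2⟩ | ⟨h1, h2⟩ <;> subst h1 <;> subst h2 <;> tauto
      rcases hx12 with rfl | rfl
      · omega
      · omega
    rw [htake, Option.none_or, List.drop_eq_getElem_cons hnlt, List.findSome?_cons, hgetn,
      resA_eq_resB sm s hs c1 hsep1 hc1, hr1]
    simp [hr1]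

-- exactly one separator char present
lemma core_one (sm s : List Char) (hs : s = sm.drop 1) (c1 c2 : Char)
    (hcs : (c1 = '+' ∧ c2 = '^') ∨ (c1 = '^' ∧ c2 = '+'))
    (hc1 : c1 ∈ s) (hc2 : c2 ∉ s) :
    s.findSome? (resA sm s) = [PySem.Chars.find s [c1]].findSome? (resB s) := by
  have hsep1 : c1 = '+' ∨ c1 = '^' := by rcases hcs with ⟨h, -⟩ | ⟨h, -⟩ <;> simp [h]
  have hA : s.findSome? (resA sm s) = resB s (PySem.Chars.find s [c1]) := by
    apply pvFindSome?_const
    · intro x hx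
      by_cases hsep : x = '+' ∨ x = '^'
      · have hx12 : x = c1 ∨ x = c2 := by
          rcases hcs with ⟨h1, h2⟩ | ⟨h1, h2⟩ <;> subst h1 <;> subst h2 <;> tauto
        rcases hx12 with rfl | rfl
        · exact Or.inr (resA_eq_resB sm s hs x hsep hx)
        · exact absurd hx hc2
      · exact Or.inl (resA_none sm s x hsep)
    · exact ⟨c1, hc1, resA_eq_resB sm s hs c1 hsep1 hc1⟩
  rw [hA]
  cases hr : resB s (PySem.Chars.find s [c1]) <;> simp [hr]

-- neither separator char present
lemma core_zero (sm s : List Char) (hp : '+' ∉ s) (hh : '^' ∉ s) :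
    s.findSome? (resA sm s) = none := by
  apply List.findSome?_eq_none_iff.2
  intro x hx
  apply resA_none
  rintro (rfl | rfl)
  · exact hp hx
  · exact hh hx

lemma sorted_nil_int : PySem.List.sorted ([] : List Int) (fun p => p) = [] :=
  PySem.List.sorted_eq_of_perm_of_pairwise_lt _ _ _ (List.Perm.nil) (List.Pairwise.nil)

lemma sorted_singleton_int (a : Int) : PySem.List.sorted [a] (fun p => p) = [a] :=
  PySem.List.sorted_eq_of_perm_of_pairwise_lt _ _ _ (List.Perm.refl _) (List.pairwise_singleton _ _)

lemma sorted_pair_int {a b : Int} (h : a < b) : PySem.List.sorted [a, b] (fun p => p) = [a, b] :=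
  PySem.List.sorted_eq_of_perm_of_pairwise_lt _ _ _ (List.Perm.refl _) (by simp [h])

lemma sorted_pair_int' {a b : Int} (h : b < a) : PySem.List.sorted [a, b] (fun p => p) = [b, a] :=
  PySem.List.sorted_eq_of_perm_of_pairwise_lt _ _ _ (List.Perm.swap _ _ _) (by simp [h])

-- ===== VERDICT (by name: the statement is the Claim_ definition above) =====
theorem split_smile_py_spec : Claim_equal_split_smile_py := by
  intro sm_t _
  unfold Spec_split_smile_py split_smile_py split_smile_py_alt
  simp only
  have hsl : PySem.List.slice sm_t.toList (some 1) none = sm_t.toList.drop 1 := by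
    rw [PySem.List.slice_from _ (by norm_num)]
    rfl
  rw [hsl]
  set sm := sm_t.toList with hsm
  set s := sm.drop 1 with hs
  rw [loopA_eq_findSome?, loopB_eq_findSome?]
  by_cases hp : '+' ∈ s <;> by_cases hh : '^' ∈ s
  · -- both present
    obtain ⟨hnn1, hget1, -⟩ := findChar_spec s '+' hp
    obtain ⟨hnn2, hget2, -⟩ := findChar_spec s '^' hh
    have hne : PySem.Chars.find s ['+'] ≠ PySem.Chars.find s ['^'] := by
      intro he
      rw [he] at hget1
      rw [hget1] at hget2
      simp at hget2
    have hf : [PySem.Chars.find s ['+'], PySem.Chars.find s ['^']].filter (fun p => p != -1) = [PySem.Chars.find s ['+'], PySem.Chars.find s ['^']] := by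
      rw [List.filter_cons_of_pos (by simpa using (by omega : PySem.Chars.find s ['+'] ≠ (-1 : Int))),
        List.filter_cons_of_pos (by simpa using (by omega : PySem.Chars.find s ['^'] ≠ (-1 : Int)))]
      rfl
    rw [hf]
    rcases lt_or_gt_of_ne hne with hlt | hgt
    · rw [sorted_pair_int hlt]
      exact core_two sm s hs '+' '^' (Or.inl ⟨rfl, rfl⟩) hp hh hlt
    · rw [sorted_pair_int' hgt]
      exact core_two sm s hs '^' '+' (Or.inr ⟨rfl, rfl⟩) hh hp hgt
  · -- only '+'
    obtain ⟨hnn1, -, -⟩ := findChar_spec s '+' hp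
    have hm1 : PySem.Chars.find s ['^'] = -1 := (PySem.Chars.find_eq_neg_one_iff s ['^']).2
      (fun hinf => hh ((singleton_infix_iff _ _).1 hinf))
    have hf : [PySem.Chars.find s ['+'], PySem.Chars.find s ['^']].filter (fun p => p != -1) = [PySem.Chars.find s ['+']] := by
      rw [List.filter_cons_of_pos (by simpa using (by omega : PySem.Chars.find s ['+'] ≠ (-1 : Int))),
        List.filter_cons_of_neg (by simp [hm1])]
      rfl
    rw [hf, sorted_singleton_int]
    exact core_one sm s hs '+' '^' (Or.inl ⟨rfl, rfl⟩) hp hh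
  · -- only '^'
    obtain ⟨hnn2, -, -⟩ := findChar_spec s '^' hh
    have hm1 : PySem.Chars.find s ['+'] = -1 := (PySem.Chars.find_eq_neg_one_iff s ['+']).2
      (fun hinf => hp ((singleton_infix_iff _ _).1 hinf))
    have hf : [PySem.Chars.find s ['+'], PySem.Chars.find s ['^']].filter (fun p => p != -1) = [PySem.Chars.find s ['^']] := by
      rw [List.filter_cons_of_neg (by simp [hm1]),
        List.filter_cons_of_pos (by simpa using (by omega : PySem.Chars.find s ['^'] ≠ (-1 : Int)))]
      rfl
    rw [hf, sorted_singleton_int]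
    exact core_one sm s hs '^' '+' (Or.inr ⟨rfl, rfl⟩) hh hp
  · -- neither
    have hm1 : PySem.Chars.find s ['+'] = -1 := (PySem.Chars.find_eq_neg_one_iff s ['+']).2
      (fun hinf => hp ((singleton_infix_iff _ _).1 hinf))
    have hm2 : PySem.Chars.find s ['^'] = -1 := (PySem.Chars.find_eq_neg_one_iff s ['^']).2
      (fun hinf => hh ((singleton_infix_iff _ _).1 hinf))
    have hf : [PySem.Chars.find s ['+'], PySem.Chars.find s ['^']].filter (fun p => p != -1) = [] := by
      rw [List.filter_cons_of_neg (by simp [hm1]), List.filter_cons_of_neg (by simp [hm2])]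
      rfl
    rw [hf, sorted_nil_int, core_zero sm s hp hh]
    rfl
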